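-- pv_equiv track=rewrite | github.com/Cal-ly/FundamentaLLM | scripts/fix_bash_multiline.py | fix_bash_block
-- ===== SOURCE A (Python) =====
-- def fix_bash_block(bash_content: str) -> str:
--     """Fix a single bash code block to use proper line continuation."""
--     lines = bash_content.split('\n')
--     fixed_lines = []
--     i = 0
--
--     while i < len(lines):
--         line = lines[i]
--
--         # Check if this line starts a command that continues on the next line
--         # Pattern: command followed by indented options on next lines
--         if line.strip() and not line.strip().startswith('#'):
--             # Look ahead to see if next lines are indented continuation
--             continuation_lines = []
--             j = i + 1
--
--             while j < len(lines):
--                 next_line = lines[j]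
--                 # Check if next line is indented (continuation) and starts with --
--                 if next_line.startswith('    ') and next_line.strip().startswith('--'):
--                     continuation_lines.append(next_line.strip())
--                     j += 1
--                 elif next_line.strip() == '':
--                     # Empty line, stop looking
--                     break
--                 else:
--                     # Not a continuation
--                     break
--
--             if continuation_lines:
--                 # Found multi-line command without backslash
--                 # Reconstruct with backslashes
--                 fixed_lines.append(line.rstrip() + ' \\')
--                 for k, cont_line in enumerate(continuation_lines):
--                     if k < len(continuation_lines) - 1:
--                         fixed_lines.append('    ' + cont_line + ' \\')
--                     else:
--                         # Last line doesn't need backslash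
--                         fixed_lines.append('    ' + cont_line)
--                 i = j
--                 continue
--
--         # Regular line, keep as is
--         fixed_lines.append(line)
--         i += 1
--
--     return '\n'.join(fixed_lines)
-- ===== SOURCE B (Python) =====
-- def fix_bash_block(bash_content: str) -> str:
--     """Single forward pass: hold a pending command line and its collected
--     continuation lines; flush the group whenever a non-continuation line arrives."""
--     out = []
--     pending = None
--     conts = []
--
--     def flush():
--         nonlocal pending, conts
--         if pending is not None:
--             if conts:
--                 out.append(pending.rstrip() + ' \\')
--                 out.extend('    ' + c + ' \\' for c in conts[:-1])
--                 out.append('    ' + conts[-1])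
--             else:
--                 out.append(pending)
--         pending, conts = None, []
--
--     for line in bash_content.split('\n'):
--         if pending is not None and line.startswith('    ') and line.strip().startswith('--'):
--             conts.append(line.strip())
--             continue
--         flush()
--         if line.strip() and not line.strip().startswith('#'):
--             pending = line
--         else:
--             out.append(line)
--     flush()
--     return '\n'.join(out)
-- ===== Notes on version B (the rewrite author's own statement) =====
-- stated objective: simpler
-- what changed: Replaced the index-driven while loop with an inner lookahead scan by a single forward pass that carries a pending command line plus its collected continuation lines and flushes the group when a non-continuation line arrives.
import Mathlib
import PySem

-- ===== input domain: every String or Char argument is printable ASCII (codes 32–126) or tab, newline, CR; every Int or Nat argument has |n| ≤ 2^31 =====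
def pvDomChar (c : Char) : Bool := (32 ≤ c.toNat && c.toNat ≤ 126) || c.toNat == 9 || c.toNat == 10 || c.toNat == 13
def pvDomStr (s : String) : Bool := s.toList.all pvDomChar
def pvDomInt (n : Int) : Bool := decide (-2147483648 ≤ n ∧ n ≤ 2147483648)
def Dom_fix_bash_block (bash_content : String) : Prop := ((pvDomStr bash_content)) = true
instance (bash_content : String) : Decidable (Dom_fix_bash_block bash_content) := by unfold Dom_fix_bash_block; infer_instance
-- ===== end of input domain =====

-- B is a simpler single-pass state machine (pending command + collected continuations)
-- instead of A's index loop with an inner lookahead scan; return value only, no side effects.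

-- ===== PORT A =====

-- s.split('\n') (sep nonempty, so Python's split never raises; Chars.splitOn is the sep ≠ '' form)
def pvSplitLines (s : String) : List String := (PySem.Chars.splitOn s.toList ['\n']).map String.ofList

-- A's inner while loop: collect consecutive continuation lines, return (continuations, rest of lines)
def pvCollectA : List String → List String × List String
  | [] => ([], [])
  | l :: ls =>
    if PySem.Str.startswith l "    " && PySem.Str.startswith (PySem.Str.strip l) "--" then
      let r := pvCollectA ls
      (PySem.Str.strip l :: r.1, r.2)
    else
      -- both the empty-line break and the non-continuation break stop at this line
      ([], l :: ls)

-- A's 'for k, cont_line in enumerate(continuation_lines)' loop: backslash on all but the last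
def pvRenderA : List String → List String
  | [] => []
  | [c] => ["    " ++ c]
  | c :: cs => ("    " ++ c ++ " \\") :: pvRenderA cs

theorem pvCollectA_snd_len (ls : List String) : (pvCollectA ls).2.length ≤ ls.length := by
  induction ls with
  | nil => simp [pvCollectA]
  | cons l ls ih =>
    simp only [pvCollectA]
    split
    · exact Nat.le_succ_of_le ih
    · simp

-- A's outer while loop over the line index
def pvGoA : List String → List String
  | [] => []
  | l :: ls =>
    if !(PySem.Str.strip l == "") && !(PySem.Str.startswith (PySem.Str.strip l) "#") then
      let r := pvCollectA ls
      if r.1.isEmpty then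
        l :: pvGoA ls
      else
        (PySem.Str.rstrip l ++ " \\") :: (pvRenderA r.1 ++ pvGoA r.2)
    else
      l :: pvGoA ls
termination_by ls => ls.length
decreasing_by
  · simp
  · exact Nat.lt_succ_of_le (pvCollectA_snd_len ls)
  · simp

def fix_bash_block (bash_content : String) : String :=
  PySem.Str.join "\n" (pvGoA (pvSplitLines bash_content))

-- ===== PORT B =====

-- B's flush(): emit the pending group (backslashes via conts[:-1] / conts[-1])
def pvFlushB (pending : Option String) (conts : List String) : List String :=
  match pending with
  | none => []
  | some p =>
    if conts.isEmpty then [p]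
    else
      (PySem.Str.rstrip p ++ " \\")
        :: (conts.dropLast.map (fun c => "    " ++ c ++ " \\")
            ++ (match conts.getLast? with
                | some c => ["    " ++ c]
                | none => []))

-- B's loop body: state is (emitted lines, pending command, collected continuations)
def pvStepB (st : List String × Option String × List String) (line : String) :
    List String × Option String × List String :=
  let (acc, pending, conts) := st
  match pending with
  | some p =>
    if PySem.Str.startswith line "    " && PySem.Str.startswith (PySem.Str.strip line) "--" then
      (acc, some p, conts ++ [PySem.Str.strip line])
    else
      let acc' := acc ++ pvFlushB (some p) conts
      if !(PySem.Str.strip line == "") && !(PySem.Str.startswith (PySem.Str.strip line) "#") then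
        (acc', some line, [])
      else
        (acc' ++ [line], none, [])
  | none =>
    if !(PySem.Str.strip line == "") && !(PySem.Str.startswith (PySem.Str.strip line) "#") then
      (acc, some line, [])
    else
      (acc ++ [line], none, [])

-- B's final flush() followed by '\n'.join(out)
def pvFinishB (st : List String × Option String × List String) : String :=
  PySem.Str.join "\n" (st.1 ++ pvFlushB st.2.1 st.2.2)

def fix_bash_block_alt (bash_content : String) : String :=
  pvFinishB ((pvSplitLines bash_content).foldl pvStepB ([], none, []))

-- ===== PRECONDITION & SPEC =====
def Spec_fix_bash_block (bash_content : String) (out : String) : Prop := out = fix_bash_block_alt bash_content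
instance (bash_content : String) (out : String) : Decidable (Spec_fix_bash_block bash_content out) := by unfold Spec_fix_bash_block; infer_instance

-- ===== CLAIM (what is proved, stated in full; the proofs are below) =====
def Claim_equal_fix_bash_block : Prop := ∀ (bash_content : String), Dom_fix_bash_block bash_content → Spec_fix_bash_block bash_content (fix_bash_block bash_content)

-- ===== LEMMAS AND PROOFS =====

-- B's renderer (dropLast/getLast?) equals A's renderer (last-marked recursion)
theorem pvRender_eq (cs : List String) :
    cs.dropLast.map (fun c => "    " ++ c ++ " \\")
      ++ (match cs.getLast? with
          | some c => ["    " ++ c]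
          | none => []) = pvRenderA cs := by
  induction cs with
  | nil => simp [pvRenderA]
  | cons c cs ih =>
    cases cs with
    | nil => simp [pvRenderA]
    | cons d ds =>
      rw [List.dropLast_cons_of_ne_nil (l := d :: ds) (by simp)]
      simp only [List.map_cons, pvRenderA, List.cons_append, List.getLast?_cons_cons]
      rw [← ih]

theorem pvCollectA_fst_nil (ls : List String) (h : (pvCollectA ls).1 = []) :
    (pvCollectA ls).2 = ls := by
  cases ls with
  | nil => simp [pvCollectA]
  | cons l ls =>
    simp only [pvCollectA] at h ⊢
    split_ifs at h ⊢ with hc; simp_all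

theorem pvGoA_start (l : String) (ls : List String)
    (h : (!(PySem.Str.strip l == "") && !(PySem.Str.startswith (PySem.Str.strip l) "#")) = true) :
    pvGoA (l :: ls) = pvFlushB (some l) (pvCollectA ls).1 ++ pvGoA (pvCollectA ls).2 := by
  rw [pvGoA, if_pos h]
  by_cases he : (pvCollectA ls).1.isEmpty
  · rw [if_pos he]
    have h1 : (pvCollectA ls).1 = [] := by simpa using he
    rw [pvCollectA_fst_nil ls h1, pvFlushB, if_pos he]
    simp
  · rw [if_neg he, pvFlushB, if_neg he, pvRender_eq]
    simp

-- the joint loop invariant: the fold from a none-state computes pvGoA,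
-- and from a some-state it computes the flushed group followed by pvGoA of the rest
theorem pvFold_inv (ls : List String) :
    (∀ acc : List String,
      (let st := ls.foldl pvStepB (acc, none, []); st.1 ++ pvFlushB st.2.1 st.2.2)
        = acc ++ pvGoA ls) ∧
    (∀ (acc : List String) (p : String) (cs : List String),
      (let st := ls.foldl pvStepB (acc, some p, cs); st.1 ++ pvFlushB st.2.1 st.2.2)
        = acc ++ pvFlushB (some p) (cs ++ (pvCollectA ls).1) ++ pvGoA (pvCollectA ls).2) := by
  induction ls with
  | nil =>
    constructor
    · intro acc; simp [pvFlushB, pvGoA]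
    · intro acc p cs; simp [pvCollectA, pvGoA]
  | cons l ls ih =>
    constructor
    · intro acc
      simp only [List.foldl_cons, pvStepB]
      by_cases hs : (!(PySem.Str.strip l == "") && !(PySem.Str.startswith (PySem.Str.strip l) "#")) = true
      · rw [if_pos hs]
        have := ih.2 acc l []
        simp only at this
        rw [this, List.nil_append, pvGoA_start l ls hs, List.append_assoc]
      · rw [if_neg hs]
        have := ih.1 (acc ++ [l])
        simp only at this
        rw [this, pvGoA, if_neg hs]
        simp
    · intro acc p cs
      simp only [List.foldl_cons, pvStepB]
      by_cases hc : (PySem.Str.startswith l "    " && PySem.Str.startswith (PySem.Str.strip l) "--") = true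
      · rw [if_pos hc]
        have := ih.2 acc p (cs ++ [PySem.Str.strip l])
        simp only at this
        rw [this]
        have hcol : pvCollectA (l :: ls) =
            (PySem.Str.strip l :: (pvCollectA ls).1, (pvCollectA ls).2) := by
          rw [pvCollectA, if_pos hc]
        rw [hcol]
        simp [List.append_assoc]
      · rw [if_neg hc]
        have hcol : pvCollectA (l :: ls) = ([], l :: ls) := by
          rw [pvCollectA, if_neg hc]
        rw [hcol]
        simp only [List.append_nil]
        by_cases hs : (!(PySem.Str.strip l == "") && !(PySem.Str.startswith (PySem.Str.strip l) "#")) = true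
        · rw [if_pos hs]
          have := ih.2 (acc ++ pvFlushB (some p) cs) l []
          simp only at this
          rw [this, List.nil_append, pvGoA_start l ls hs]
          simp [List.append_assoc]
        · rw [if_neg hs]
          have := ih.1 (acc ++ pvFlushB (some p) cs ++ [l])
          simp only at this
          rw [this, pvGoA, if_neg hs]
          simp [List.append_assoc]

-- ===== VERDICT (by name: the statement is the Claim_ definition above) =====
theorem fix_bash_block_spec : Claim_equal_fix_bash_block := by
  intro s _
  unfold Spec_fix_bash_block fix_bash_block fix_bash_block_alt pvFinishB
  have := (pvFold_inv (pvSplitLines s)).1 []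
  simp only at this
  rw [this, List.nil_append]
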